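-- pv_equiv track=rewrite | github.com/gucluceyhan/ai_dataset_creation | EBook-4.py | match_headings_with_numbers
-- ===== SOURCE A (Python) =====
-- def match_headings_with_numbers(loose_numbers, headings_without_numbers, headings_with_numbers):
--     matched_headings = []
--     number_index = 0
--
--     # Önce başlıksız sayılarla başlıkları eşleştir
--     for heading in headings_without_numbers:
--         if number_index < len(loose_numbers):
--             matched_headings.append((heading, loose_numbers[number_index]))
--             number_index += 1
--         else:
--             matched_headings.append((heading, None))
--
--     # Sonra sayfa numarası olan başlıkları ekle
--     matched_headings.extend(headings_with_numbers)
--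
--     return matched_headings
-- ===== SOURCE B (Python) =====
-- def match_headings_with_numbers(loose_numbers, headings_without_numbers, headings_with_numbers):
--     # Inverted traversal: the NUMBERS drive the loop, consuming a heading iterator;
--     # leftover headings are drained from the iterator as (h, None).
--     out = []
--     heads = iter(headings_without_numbers)
--     for n in loose_numbers:
--         h = next(heads, None)
--         if h is None:
--             break
--         out.append((h, n))
--     out += [(h, None) for h in heads]
--     out += headings_with_numbers
--     return out
-- ===== Notes on version B (the rewrite author's own statement) =====
-- stated objective: alternative
-- what changed: Inverts the traversal: instead of A's heading-driven loop guarded by an index into the numbers, B iterates over the numbers while consuming a heading iterator (breaking when headings run out), then drains the leftover headings from the iterator as (h, None) and appends the numbered headings.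
import Mathlib
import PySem

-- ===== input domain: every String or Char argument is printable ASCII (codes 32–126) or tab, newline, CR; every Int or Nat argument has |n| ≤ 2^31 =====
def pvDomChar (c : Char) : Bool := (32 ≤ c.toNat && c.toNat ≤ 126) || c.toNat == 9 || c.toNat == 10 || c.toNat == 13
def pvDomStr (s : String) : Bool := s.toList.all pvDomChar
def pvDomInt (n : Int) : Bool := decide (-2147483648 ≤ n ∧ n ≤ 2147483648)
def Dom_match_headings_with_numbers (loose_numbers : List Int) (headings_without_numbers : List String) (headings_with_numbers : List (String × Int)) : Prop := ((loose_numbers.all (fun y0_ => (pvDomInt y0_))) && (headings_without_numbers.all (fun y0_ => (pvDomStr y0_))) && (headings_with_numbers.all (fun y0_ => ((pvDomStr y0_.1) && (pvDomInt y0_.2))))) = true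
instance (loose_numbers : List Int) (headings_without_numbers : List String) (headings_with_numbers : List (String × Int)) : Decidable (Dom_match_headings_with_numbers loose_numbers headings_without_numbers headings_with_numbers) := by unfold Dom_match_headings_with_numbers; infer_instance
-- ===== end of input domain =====

-- B inverts the traversal: the numbers drive the loop, consuming a heading iterator and
-- breaking when it is exhausted; leftover headings are drained as (h, None), then the
-- numbered headings are appended (objective: alternative; same cost).

-- ===== PORT A =====
-- the for-loop: state is (matched_headings, number_index)
def pvLoopA (loose_numbers : List Int) (headings : List String)
    (number_index : Int) (matched : List (String × Option Int)) : List (String × Option Int) :=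
  match headings with
  | [] => matched
  | h :: t =>
    if number_index < (loose_numbers.length : Int) then
      pvLoopA loose_numbers t (number_index + 1)
        (matched ++ [(h, PySem.List.pyGet? loose_numbers number_index)])
    else
      pvLoopA loose_numbers t number_index (matched ++ [(h, none)])

def match_headings_with_numbers (loose_numbers : List Int) (headings_without_numbers : List String) (headings_with_numbers : List (String × Int)) : List (String × Option Int) :=
  pvLoopA loose_numbers headings_without_numbers 0 []
    ++ headings_with_numbers.map (fun p => (p.1, some p.2))

-- ===== PORT B =====
-- the number-driven loop: state is (out, remaining iterator = list of headings not yet consumed);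
-- the 'break' when next(heads) is exhausted is the [] case of heads
def pvLoopB : List Int → List String → List (String × Option Int) →
    List (String × Option Int) × List String
  | [], heads, out => (out, heads)
  | _ :: _, [], out => (out, [])
  | n :: ns, h :: hs, out => pvLoopB ns hs (out ++ [(h, some n)])

def match_headings_with_numbers_alt (loose_numbers : List Int) (headings_without_numbers : List String) (headings_with_numbers : List (String × Int)) : List (String × Option Int) :=
  let s := pvLoopB loose_numbers headings_without_numbers []
  s.1 ++ s.2.map (fun h => (h, none)) ++ headings_with_numbers.map (fun p => (p.1, some p.2))

-- ===== PRECONDITION & SPEC =====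
def Spec_match_headings_with_numbers (loose_numbers : List Int) (headings_without_numbers : List String) (headings_with_numbers : List (String × Int)) (out : List (String × Option Int)) : Prop := out = match_headings_with_numbers_alt loose_numbers headings_without_numbers headings_with_numbers
instance (loose_numbers : List Int) (headings_without_numbers : List String) (headings_with_numbers : List (String × Int)) (out : List (String × Option Int)) : Decidable (Spec_match_headings_with_numbers loose_numbers headings_without_numbers headings_with_numbers out) := by unfold Spec_match_headings_with_numbers; infer_instance

-- ===== CLAIM (what is proved, stated in full; the proofs are below) =====
def Claim_equal_match_headings_with_numbers : Prop := ∀ (loose_numbers : List Int) (headings_without_numbers : List String) (headings_with_numbers : List (String × Int)), Dom_match_headings_with_numbers loose_numbers headings_without_numbers headings_with_numbers → Spec_match_headings_with_numbers loose_numbers headings_without_numbers headings_with_numbers (match_headings_with_numbers loose_numbers headings_without_numbers headings_with_numbers)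

-- ===== LEMMAS AND PROOFS =====

-- A's loop at index i, seen on the suffix ln.drop i, in zip/drop normal form
theorem pvLoopA_eq_body (headings : List String) :
    ∀ (ln : List Int) (i : Int) (acc : List (String × Option Int)), 0 ≤ i →
    pvLoopA ln headings i acc
      = acc ++ ((headings.zip (ln.drop i.toNat)).map (fun p => (p.1, some p.2))
          ++ (headings.drop (ln.drop i.toNat).length).map (fun h => (h, none))) := by
  induction headings with
  | nil => intro ln i acc hi; simp [pvLoopA]
  | cons h t ih =>
    intro ln i acc hi
    by_cases hlt : i < (ln.length : Int)
    · have hidx : i.toNat < ln.length := by omega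
      obtain ⟨v, rest, hdrop⟩ : ∃ v rest, ln.drop i.toNat = v :: rest := by
        cases hd : ln.drop i.toNat with
        | nil => exfalso; have := List.length_drop (l := ln) (i := i.toNat); rw [hd] at this; simp at this; omega
        | cons v rest => exact ⟨v, rest, rfl⟩
      have hget : PySem.List.pyGet? ln i = some v := by
        rw [PySem.List.pyGet?_of_nonneg ln hi]
        have : (List.drop i.toNat ln)[0]? = ln[i.toNat + 0]? := List.getElem?_drop
        rw [hdrop] at this; simpa using this.symm
      have hdrop' : ln.drop (i + 1).toNat = rest := by
        have h1 : (i + 1).toNat = i.toNat + 1 := by omega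
        rw [h1, ← List.drop_drop, hdrop]; simp
      rw [pvLoopA, if_pos hlt, hget, ih ln (i + 1) _ (by omega), hdrop', hdrop]
      simp
    · have hdrop : ln.drop i.toNat = [] := by
        apply List.drop_eq_nil_of_le; omega
      rw [pvLoopA, if_neg hlt, ih ln i _ hi, hdrop]
      simp

-- B's loop in the same zip/drop normal form: the paired prefix out front, the
-- unconsumed headings as the second component
theorem pvLoopB_eq (ns : List Int) :
    ∀ (heads : List String) (out : List (String × Option Int)),
    pvLoopB ns heads out
      = (out ++ (heads.zip ns).map (fun p => (p.1, some p.2)), heads.drop ns.length) := by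
  induction ns with
  | nil => intro heads out; simp [pvLoopB]
  | cons n ns' ih =>
    intro heads out
    cases heads with
    | nil => simp [pvLoopB]
    | cons h hs => rw [pvLoopB, ih]; simp

-- ===== VERDICT (by name: the statement is the Claim_ definition above) =====
theorem match_headings_with_numbers_spec : Claim_equal_match_headings_with_numbers := by
  intro ln hwn hw _
  unfold Spec_match_headings_with_numbers match_headings_with_numbers match_headings_with_numbers_alt
  rw [pvLoopA_eq_body hwn ln 0 [] le_rfl, pvLoopB_eq]
  simp
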